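-- pv_equiv track=rewrite | github.com/craftor-3622/Coding_test | Python/1949_Hiking_trail.py | start_point
-- ===== SOURCE A (Python) =====
-- def start_point(area: list, length: int):
--     max_height = 0
--     max_idx_list = []
--
--     for i in range(length):
--         for j in range(length):
--             if area[i][j] > max_height:
--                 max_height = area[i][j]
--                 max_idx_list.clear()
--                 max_idx_list.append([i, j])
--             elif area[i][j] == max_height:
--                 max_idx_list.append([i, j])
--
--     return max_idx_list
-- ===== SOURCE B (Python) =====
-- def start_point(area: list, length: int):
--     # Two-pass version: find the running max (floored at 0) first,
--     # then collect all cells equal to it in row-major order.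
--     max_height = 0
--     for i in range(length):
--         for j in range(length):
--             if area[i][j] > max_height:
--                 max_height = area[i][j]
--     return [[i, j] for i in range(length) for j in range(length)
--             if area[i][j] == max_height]
-- ===== Notes on version B (the rewrite author's own statement) =====
-- stated objective: simpler
-- what changed: A maintains the argmax list in a single pass with clear/append bookkeeping on a running max; B makes two plain passes: first compute the maximum (floored at 0, as A's initial value does), then collect all cells equal to it with a comprehension.
import Mathlib
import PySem

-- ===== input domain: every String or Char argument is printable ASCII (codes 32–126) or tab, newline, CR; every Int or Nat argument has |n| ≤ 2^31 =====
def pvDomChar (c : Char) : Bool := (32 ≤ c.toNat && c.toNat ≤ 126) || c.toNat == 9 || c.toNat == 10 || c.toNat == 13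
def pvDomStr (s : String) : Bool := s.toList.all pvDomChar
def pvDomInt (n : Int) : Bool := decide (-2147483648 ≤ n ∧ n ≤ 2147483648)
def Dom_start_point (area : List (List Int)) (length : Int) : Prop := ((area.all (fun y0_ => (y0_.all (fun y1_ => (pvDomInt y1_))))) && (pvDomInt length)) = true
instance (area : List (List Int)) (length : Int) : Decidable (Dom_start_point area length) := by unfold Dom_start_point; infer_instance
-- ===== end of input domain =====

-- B replaces A's single pass with clear/append list maintenance by two plain passes
-- (first compute the max, then collect the matching cells); objective: simpler, not faster.

-- ===== PORT A =====
-- single pass keeping (running max floored at 0, list of argmax cells)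
def start_point (area : List (List Int)) (length : Int) : List (List Int) :=
  ((PySem.List.pyRange 0 length 1).foldl (fun (st : Int × List (List Int)) i =>
      (PySem.List.pyRange 0 length 1).foldl (fun st j =>
        let v := PySem.List.pyGetD (PySem.List.pyGetD area i []) j 0
        if v > st.1 then (v, [[i, j]])
        else if v = st.1 then (st.1, st.2 ++ [[i, j]])
        else st) st)
    ((0 : Int), ([] : List (List Int)))).2

-- ===== PORT B =====
-- pass 1: running max (floored at 0); pass 2: comprehension collecting the cells equal to it
def start_point_alt (area : List (List Int)) (length : Int) : List (List Int) :=
  let m : Int := (PySem.List.pyRange 0 length 1).foldl (fun m i =>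
      (PySem.List.pyRange 0 length 1).foldl (fun m j =>
        let v := PySem.List.pyGetD (PySem.List.pyGetD area i []) j 0
        if v > m then v else m) m) 0
  (PySem.List.pyRange 0 length 1).foldl (fun acc i =>
      (PySem.List.pyRange 0 length 1).foldl (fun acc j =>
        if PySem.List.pyGetD (PySem.List.pyGetD area i []) j 0 = m then acc ++ [[i, j]] else acc) acc) []

-- ===== PRECONDITION & SPEC =====
-- Pre_ excludes exactly the inputs where Python A raises IndexError: a positive length
-- larger than the grid (fewer than `length` rows, or a visited row shorter than `length`).
def Pre_start_point (area : List (List Int)) (length : Int) : Prop :=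
  0 < length → (length ≤ (area.length : Int) ∧ ∀ row ∈ area.take length.toNat, length ≤ (row.length : Int))
instance (area : List (List Int)) (length : Int) : Decidable (Pre_start_point area length) := by unfold Pre_start_point; infer_instance
def pvWitness_start_point : List (List Int) × Int := ([[1, 2], [3, 0]], 2)

def Spec_start_point (area : List (List Int)) (length : Int) (out : List (List Int)) : Prop := out = start_point_alt area length
instance (area : List (List Int)) (length : Int) (out : List (List Int)) : Decidable (Spec_start_point area length out) := by unfold Spec_start_point; infer_instance

-- ===== CLAIM (what is proved, stated in full; the proofs are below) =====
def Claim_equal_start_point : Prop := ∀ (area : List (List Int)) (length : Int), Dom_start_point area length → Pre_start_point area length → Spec_start_point area length (start_point area length)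

-- ===== LEMMAS AND PROOFS =====

-- the row-major list of cells (i, j, value) both ports traverse
def pvCells (area : List (List Int)) (length : Int) : List (Int × Int × Int) :=
  (PySem.List.pyRange 0 length 1).flatMap (fun i =>
    (PySem.List.pyRange 0 length 1).map (fun j =>
      (i, j, PySem.List.pyGetD (PySem.List.pyGetD area i []) j 0)))

-- A's step function on the flattened cell list
def pvStepA (st : Int × List (List Int)) (c : Int × Int × Int) : Int × List (List Int) :=
  if c.2.2 > st.1 then (c.2.2, [[c.1, c.2.1]])
  else if c.2.2 = st.1 then (st.1, st.2 ++ [[c.1, c.2.1]])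
  else st

-- running max of the values, starting at m
def pvM (cs : List (Int × Int × Int)) (m : Int) : Int :=
  cs.foldl (fun a c => max a c.2.2) m

lemma pvM_le (cs : List (Int × Int × Int)) (m : Int) : m ≤ pvM cs m :=
  (PySem.List.le_foldl_max_int cs (fun c => c.2.2) m).1

lemma pvStepA_inv (cs : List (Int × Int × Int)) : ∀ (m : Int) (acc : List (List Int)),
    cs.foldl pvStepA (m, acc) =
      (pvM cs m,
       (if pvM cs m = m then acc else []) ++ (cs.filter (fun c => c.2.2 = pvM cs m)).map (fun c => [c.1, c.2.1])) := by
  induction cs with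
  | nil => intro m acc; simp [pvM]
  | cons c rest ih =>
    intro m acc
    have hM : pvM (c :: rest) m = pvM rest (max m c.2.2) := by simp [pvM]
    rw [List.foldl_cons]
    by_cases h1 : c.2.2 > m
    · have hst : pvStepA (m, acc) c = (c.2.2, [[c.1, c.2.1]]) := by simp [pvStepA, h1]
      have hmax : max m c.2.2 = c.2.2 := by omega
      have hge : c.2.2 ≤ pvM rest c.2.2 := pvM_le rest c.2.2
      have hne : pvM rest c.2.2 ≠ m := by omega
      rw [hst, ih, hM, hmax, if_neg hne]
      simp only [List.filter_cons]
      by_cases h2 : c.2.2 = pvM rest c.2.2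
      · rw [if_pos h2.symm]
        simp [← h2]
      · rw [if_neg (fun e => h2 e.symm)]
        simp [h2]
    · have hmax : max m c.2.2 = m := by omega
      have hge : m ≤ pvM rest m := pvM_le rest m
      by_cases h2 : c.2.2 = m
      · have hst : pvStepA (m, acc) c = (m, acc ++ [[c.1, c.2.1]]) := by
          simp [pvStepA, h2]
        rw [hst, ih, hM, hmax]
        simp only [List.filter_cons]
        by_cases h3 : pvM rest m = m
        · simp [h2, h3]
        · have hne : c.2.2 ≠ pvM rest m := by omega
          simp [hne, if_neg h3]
      · have hst : pvStepA (m, acc) c = (m, acc) := by simp [pvStepA, h1, h2]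
        rw [hst, ih, hM, hmax]
        have hne : ¬ (c.2.2 = pvM rest m) := by omega
        simp [hne]

-- A = fold of pvStepA over the flattened cells
lemma startA_eq (area : List (List Int)) (length : Int) :
    start_point area length = ((pvCells area length).foldl pvStepA ((0 : Int), ([] : List (List Int)))).2 := by
  unfold start_point pvCells
  rw [List.foldl_flatMap]
  congr 1
  apply PySem.List.foldl_congr_mem
  intro st i _
  rw [List.foldl_map]
  apply PySem.List.foldl_congr_mem
  intro st' j _
  rfl

-- B's first pass = pvM over the flattened cells
lemma altMax_eq (area : List (List Int)) (length : Int) :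
    ((PySem.List.pyRange 0 length 1).foldl (fun m i =>
      (PySem.List.pyRange 0 length 1).foldl (fun m j =>
        let v := PySem.List.pyGetD (PySem.List.pyGetD area i []) j 0
        if v > m then v else m) m) 0) = pvM (pvCells area length) 0 := by
  unfold pvM pvCells
  rw [List.foldl_flatMap]
  apply PySem.List.foldl_congr_mem
  intro m i _
  rw [List.foldl_map]
  apply PySem.List.foldl_congr_mem
  intro m' j _
  simp only []
  omega

-- B's second pass = filter+map over the flattened cells
lemma altCollect_eq (area : List (List Int)) (length : Int) (m : Int) :
    ((PySem.List.pyRange 0 length 1).foldl (fun acc i =>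
      (PySem.List.pyRange 0 length 1).foldl (fun acc j =>
        if PySem.List.pyGetD (PySem.List.pyGetD area i []) j 0 = m then acc ++ [[i, j]] else acc) acc) []) =
    ((pvCells area length).filter (fun c => c.2.2 = m)).map (fun c => [c.1, c.2.1]) := by
  have key : ((pvCells area length).foldl
        (fun acc c => if c.2.2 = m then acc ++ [[c.1, c.2.1]] else acc) ([] : List (List Int)))
      = ((pvCells area length).filter (fun c => c.2.2 = m)).map (fun c => [c.1, c.2.1]) := by
    simpa using PySem.List.foldl_append_if
      (fun c : Int × Int × Int => decide (c.2.2 = m)) (fun c => [c.1, c.2.1]) (pvCells area length) []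
  rw [← key]
  unfold pvCells
  rw [List.foldl_flatMap]
  apply PySem.List.foldl_congr_mem
  intro acc i _
  rw [List.foldl_map]

-- ===== VERDICT (by name: the statement is the Claim_ definition above) =====
theorem start_point_spec : Claim_equal_start_point := by
  intro area length _ _
  unfold Spec_start_point start_point_alt
  rw [startA_eq, altMax_eq, altCollect_eq, pvStepA_inv]
  simp
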